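-- pv_equiv track=rewrite | github.com/danglong78/Project2_AI | Project_AI_2/Project_AI_2/Propositional_Logic.py | Find_Stench
-- ===== SOURCE A (Python) =====
-- def Manhattan(des,cur):
--     return (abs(des[0]-cur[0]) + abs(des[1] - cur[1]))
--
-- def Find_Stench(A_map,cur_pos,h,w):
--     result_list = []
--     for i in range(h):
--         for z in range(w):
--             if ('S' in A_map[i][z]) and ('W' not in A_map[i][z]) and ('P' not in A_map[i][z]):
--                 result_list.append([i,z])
--     if len(result_list)==0:
--         return []
--     result_list.sort(key = lambda x: Manhattan(x,cur_pos))
--     return result_list[0]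
-- ===== SOURCE B (Python) =====
-- def Find_Stench(A_map, cur_pos, h, w):
--     # single pass keeping the running nearest qualifying cell (strict < keeps the
--     # first-encountered cell on ties, like A's stable sort); no list, no sort
--     best = None
--     best_d = None
--     for i in range(h):
--         for z in range(w):
--             cell = A_map[i][z]
--             if 'S' in cell and 'W' not in cell and 'P' not in cell:
--                 d = abs(i - cur_pos[0]) + abs(z - cur_pos[1])
--                 if best is None or d < best_d:
--                     best = [i, z]
--                     best_d = d
--     return best if best is not None else []
-- ===== Notes on version B (the rewrite author's own statement) =====
-- stated objective: simpler
-- what changed: Replaces A's collect-all-matching-cells list plus a global stable sort by Manhattan distance with a single scan that keeps only the running nearest cell (strict < preserves A's first-on-tie choice), eliminating the intermediate list and the sort.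
import Mathlib
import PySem

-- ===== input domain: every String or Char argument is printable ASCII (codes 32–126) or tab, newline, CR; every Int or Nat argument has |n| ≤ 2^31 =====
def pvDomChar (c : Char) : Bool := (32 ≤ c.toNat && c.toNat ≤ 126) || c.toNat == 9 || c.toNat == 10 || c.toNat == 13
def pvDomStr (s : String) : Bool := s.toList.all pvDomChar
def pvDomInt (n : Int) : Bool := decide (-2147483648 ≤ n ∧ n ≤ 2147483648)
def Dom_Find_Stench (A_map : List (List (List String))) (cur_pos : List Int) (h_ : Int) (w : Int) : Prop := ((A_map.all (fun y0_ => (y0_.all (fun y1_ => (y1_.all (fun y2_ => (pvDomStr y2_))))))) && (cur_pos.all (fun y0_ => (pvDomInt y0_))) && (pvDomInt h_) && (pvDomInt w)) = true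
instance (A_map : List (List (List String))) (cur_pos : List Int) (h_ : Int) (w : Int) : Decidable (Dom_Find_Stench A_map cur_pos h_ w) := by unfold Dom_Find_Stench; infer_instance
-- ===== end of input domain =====

-- B replaces A's collect-then-stable-sort with a single running-nearest scan (simpler; no intermediate list, no sort).

-- ===== PORT A =====
def Manhattan (des cur : List Int) : Int :=
  |PySem.List.pyGetD des 0 0 - PySem.List.pyGetD cur 0 0| +
  |PySem.List.pyGetD des 1 0 - PySem.List.pyGetD cur 1 0|

-- pyGetD is exact under Pre_Find_Stench (all indexing is in range there)
def Find_Stench (A_map : List (List (List String))) (cur_pos : List Int) (h_ : Int) (w : Int) : List Int :=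
  let result_list :=
    (PySem.List.pyRange 0 h_ 1).foldl (fun acc i =>
      (PySem.List.pyRange 0 w 1).foldl (fun acc z =>
        let cell := PySem.List.pyGetD (PySem.List.pyGetD A_map i []) z []
        if cell.contains "S" && !(cell.contains "W") && !(cell.contains "P")
        then acc ++ [[i, z]] else acc) acc) []
  if result_list = [] then []
  else (PySem.List.sorted result_list (fun x => Manhattan x cur_pos)).headD []

-- ===== PORT B =====
def Find_Stench_alt (A_map : List (List (List String))) (cur_pos : List Int) (h_ : Int) (w : Int) : List Int :=
  let st :=
    (PySem.List.pyRange 0 h_ 1).foldl (fun st i =>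
      (PySem.List.pyRange 0 w 1).foldl (fun st z =>
        let cell := PySem.List.pyGetD (PySem.List.pyGetD A_map i []) z []
        if cell.contains "S" && !(cell.contains "W") && !(cell.contains "P") then
          let d := |i - PySem.List.pyGetD cur_pos 0 0| + |z - PySem.List.pyGetD cur_pos 1 0|
          match st with
          | none => some ([i, z], d)
          | some (b, bd) => if d < bd then some ([i, z], d) else some (b, bd)
        else st) st) (none : Option (List Int × Int))
  match st with
  | none => []
  | some (b, _) => b

-- ===== PRECONDITION & SPEC =====
-- Pre_ excludes exactly the inputs on which the Python A raises IndexError: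
-- a visited row/cell index out of range, or cur_pos shorter than 2 while some
-- qualifying cell exists (the sort key then indexes cur_pos[0]/cur_pos[1]).
def Pre_Find_Stench (A_map : List (List (List String))) (cur_pos : List Int) (h_ : Int) (w : Int) : Prop :=
  (h_ ≤ 0 ∨ w ≤ 0 ∨ (h_ ≤ (A_map.length : Int) ∧ ∀ row ∈ A_map.take h_.toNat, w ≤ (row.length : Int)))
  ∧ (2 ≤ cur_pos.length ∨ ∀ row ∈ A_map.take h_.toNat, ∀ cell ∈ row.take w.toNat,
      ¬(cell.contains "S" && !(cell.contains "W") && !(cell.contains "P")) = true)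
instance (A_map : List (List (List String))) (cur_pos : List Int) (h_ : Int) (w : Int) : Decidable (Pre_Find_Stench A_map cur_pos h_ w) := by unfold Pre_Find_Stench; infer_instance

def pvWitness_Find_Stench : List (List (List String)) × List Int × Int × Int :=
  ([[["S"], ["G"]], [["S", "W"], ["S"]]], [1, 1], 2, 2)

def Spec_Find_Stench (A_map : List (List (List String))) (cur_pos : List Int) (h_ : Int) (w : Int) (out : List Int) : Prop := out = Find_Stench_alt A_map cur_pos h_ w
instance (A_map : List (List (List String))) (cur_pos : List Int) (h_ : Int) (w : Int) (out : List Int) : Decidable (Spec_Find_Stench A_map cur_pos h_ w out) := by unfold Spec_Find_Stench; infer_instance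

-- ===== CLAIM (what is proved, stated in full; the proofs are below) =====
def Claim_equal_Find_Stench : Prop := ∀ (A_map : List (List (List String))) (cur_pos : List Int) (h_ : Int) (w : Int), Dom_Find_Stench A_map cur_pos h_ w → Pre_Find_Stench A_map cur_pos h_ w → Spec_Find_Stench A_map cur_pos h_ w (Find_Stench A_map cur_pos h_ w)

-- ===== LEMMAS AND PROOFS =====

-- the running first-min step (state = current best), matching one insertBy's head
def pvStep {α : Type} (bf : α → α → Bool) (st : Option α) (x : α) : Option α :=
  some (match st with
        | none => x
        | some m => if bf x m then x else m)

-- B's step, carrying the best distance alongside the best cell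
def pvStepD (key : List Int → Int) (st : Option (List Int × Int)) (x : List Int) :
    Option (List Int × Int) :=
  match st with
  | none => some (x, key x)
  | some (b, bd) => if key x < bd then some (x, key x) else some (b, bd)

-- head of one stable insertion: the new element takes the head iff strictly before
theorem head?_insertBy {α : Type} (bf : α → α → Bool) (x : α) (ys : List α) :
    (PySem.List.insertBy bf x ys).head? =
      some (match ys.head? with
            | none => x
            | some m => if bf x m then x else m) := by
  cases ys with
  | nil => rfl
  | cons y t =>
    simp only [PySem.List.insertBy]
    split <;> simp_all

-- head of the whole insertion-sort fold = running first-min fold over the same list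
theorem head?_foldl_insertBy {α : Type} (bf : α → α → Bool) (cs : List α) (acc : List α) :
    (cs.foldl (fun a x => PySem.List.insertBy bf x a) acc).head? =
      cs.foldl (pvStep bf) acc.head? := by
  induction cs generalizing acc with
  | nil => rfl
  | cons c t ih =>
    simp only [List.foldl_cons]
    rw [ih, head?_insertBy]
    rfl

-- the running-min fold never returns to none
theorem pvStep_foldl_some {α : Type} (bf : α → α → Bool) (cs : List α) (m : α) :
    ∃ m', cs.foldl (pvStep bf) (some m) = some m' := by
  induction cs generalizing m with
  | nil => exact ⟨m, rfl⟩
  | cons c t ih => exact ih _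

-- the distance-carrying fold is the plain fold paired with its key
theorem foldl_pvStepD (key : List Int → Int) (cs : List (List Int)) (st : Option (List Int)) :
    cs.foldl (pvStepD key) (st.map (fun b => (b, key b))) =
      (cs.foldl (pvStep (fun a b => decide (key a < key b))) st).map (fun b => (b, key b)) := by
  induction cs generalizing st with
  | nil => rfl
  | cons c t ih =>
    simp only [List.foldl_cons]
    have hstep : pvStepD key (st.map (fun b => (b, key b))) c =
        (pvStep (fun a b => decide (key a < key b)) st c).map (fun b => (b, key b)) := by
      cases st with
      | none => rfl
      | some m =>
        simp only [pvStepD, pvStep, Option.map_some, decide_eq_true_eq]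
        by_cases hlt : key c < key m <;> simp [hlt]
    rw [hstep, ← ih]

-- A's nested collecting fold, in closed form
theorem collect_eq {α : Type} (P : Int → Int → Bool) (f : Int → Int → α)
    (rs ws : List Int) (acc : List α) :
    rs.foldl (fun acc i => ws.foldl (fun acc z => if P i z then acc ++ [f i z] else acc) acc) acc
      = acc ++ rs.flatMap (fun i => (ws.filter (P i)).map (f i)) := by
  induction rs generalizing acc with
  | nil => simp
  | cons r t ih =>
    simp only [List.foldl_cons, List.flatMap_cons]
    rw [PySem.List.foldl_append_if, ih, List.append_assoc]

-- B's nested conditional fold = a flat fold over the collected list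
theorem nested_foldl_eq {α β : Type} (P : Int → Int → Bool) (f : Int → Int → α)
    (g : β → α → β) (rs ws : List Int) (st : β) :
    rs.foldl (fun st i => ws.foldl (fun st z => if P i z then g st (f i z) else st) st) st
      = (rs.flatMap (fun i => (ws.filter (P i)).map (f i))).foldl g st := by
  induction rs generalizing st with
  | nil => rfl
  | cons r t ih =>
    simp only [List.foldl_cons, List.flatMap_cons, List.foldl_append]
    rw [ih]
    congr 1
    rw [List.foldl_map, List.foldl_filter]

-- the distance B computes at cell [i, z] is A's sort key there
theorem Manhattan_pair (i z : Int) (cur : List Int) :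
    Manhattan [i, z] cur =
      |i - PySem.List.pyGetD cur 0 0| + |z - PySem.List.pyGetD cur 1 0| := by
  simp [Manhattan, PySem.List.pyGetD, PySem.List.pyIdx?, PySem.List.pyGet?]

theorem Find_Stench_spec : Claim_equal_Find_Stench := by
  intro A_map cur_pos h_ w _ _
  unfold Spec_Find_Stench Find_Stench Find_Stench_alt
  simp only []
  set P : Int → Int → Bool := fun i z =>
    let cell := PySem.List.pyGetD (PySem.List.pyGetD A_map i []) z []
    cell.contains "S" && !(cell.contains "W") && !(cell.contains "P") with hP
  set key : List Int → Int := fun x => Manhattan x cur_pos with hkey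
  set f : Int → Int → List Int := fun i z => [i, z] with hf
  set rs := PySem.List.pyRange 0 h_ 1
  set ws := PySem.List.pyRange 0 w 1
  set L := rs.flatMap (fun i => (ws.filter (P i)).map (f i)) with hL
  -- A's collected list is L
  have hLcoll : rs.foldl (fun acc i => ws.foldl (fun acc z =>
      if P i z then acc ++ [f i z] else acc) acc) ([] : List (List Int)) = L := by
    rw [collect_eq, List.nil_append]
  -- B's nested fold is the distance-carrying fold over L
  have hB : rs.foldl (fun st i => ws.foldl (fun st z =>
        if P i z then
          (match st with
           | none => some (f i z, |i - PySem.List.pyGetD cur_pos 0 0| + |z - PySem.List.pyGetD cur_pos 1 0|)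
           | some (b, bd) =>
              if |i - PySem.List.pyGetD cur_pos 0 0| + |z - PySem.List.pyGetD cur_pos 1 0| < bd
              then some (f i z, |i - PySem.List.pyGetD cur_pos 0 0| + |z - PySem.List.pyGetD cur_pos 1 0|)
              else some (b, bd))
        else st) st) (none : Option (List Int × Int))
      = L.foldl (pvStepD key) none := by
    have hgz : ∀ (i z : Int) (st : Option (List Int × Int)),
        (match st with
         | none => some (f i z, |i - PySem.List.pyGetD cur_pos 0 0| + |z - PySem.List.pyGetD cur_pos 1 0|)
         | some (b, bd) =>
            if |i - PySem.List.pyGetD cur_pos 0 0| + |z - PySem.List.pyGetD cur_pos 1 0| < bd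
            then some (f i z, |i - PySem.List.pyGetD cur_pos 0 0| + |z - PySem.List.pyGetD cur_pos 1 0|)
            else some (b, bd)) = pvStepD key st (f i z) := by
      intro i z st
      have hkf : key (f i z) = |i - PySem.List.pyGetD cur_pos 0 0| + |z - PySem.List.pyGetD cur_pos 1 0| := by
        rw [hkey, hf]; exact Manhattan_pair i z cur_pos
      cases st with
      | none => simp [pvStepD, hkf]
      | some p => cases p with
        | mk b bd => simp [pvStepD, hkf]
    have hfun : (fun (st : Option (List Int × Int)) (i : Int) => ws.foldl (fun st z =>
        if P i z then
          (match st with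
           | none => some (f i z, |i - PySem.List.pyGetD cur_pos 0 0| + |z - PySem.List.pyGetD cur_pos 1 0|)
           | some (b, bd) =>
              if |i - PySem.List.pyGetD cur_pos 0 0| + |z - PySem.List.pyGetD cur_pos 1 0| < bd
              then some (f i z, |i - PySem.List.pyGetD cur_pos 0 0| + |z - PySem.List.pyGetD cur_pos 1 0|)
              else some (b, bd))
        else st) st)
        = (fun st i => ws.foldl (fun st z => if P i z then pvStepD key st (f i z) else st) st) := by
      funext st i
      have hinner : (fun (st : Option (List Int × Int)) (z : Int) =>
          if P i z then
            (match st with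
             | none => some (f i z, |i - PySem.List.pyGetD cur_pos 0 0| + |z - PySem.List.pyGetD cur_pos 1 0|)
             | some (b, bd) =>
                if |i - PySem.List.pyGetD cur_pos 0 0| + |z - PySem.List.pyGetD cur_pos 1 0| < bd
                then some (f i z, |i - PySem.List.pyGetD cur_pos 0 0| + |z - PySem.List.pyGetD cur_pos 1 0|)
                else some (b, bd))
          else st)
          = (fun st z => if P i z then pvStepD key st (f i z) else st) := by
        funext st z
        by_cases hp : P i z
        · simp only [hp, if_true, hgz]
        · simp [hp]
      rw [hinner]
    rw [hfun, nested_foldl_eq]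
  rw [hLcoll, hB]
  rw [PySem.List.sorted_eq_foldl_insertBy]
  cases hLe : L with
  | nil => simp
  | cons c t =>
    obtain ⟨m, hm⟩ := pvStep_foldl_some (fun a b => decide (key a < key b)) t c
    have hfold : (c :: t).foldl (pvStep (fun a b => decide (key a < key b))) none = some m := by
      simpa [pvStep] using hm
    have hpair : (c :: t).foldl (pvStepD key) none = some (m, key m) := by
      have h := foldl_pvStepD key (c :: t) (none : Option (List Int))
      simpa [hfold] using h
    have hhead := head?_foldl_insertBy (fun a b => decide (key a < key b)) (c :: t) ([] : List (List Int))
    simp only [List.head?_nil] at hhead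
    rw [hfold] at hhead
    simp only [hpair, List.headD_eq_head?_getD, hhead]
    simp
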